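-- pv_equiv track=rewrite | github.com/zgp0406/algoguide-agent | agent/sessions.py | _seed_summary
-- ===== SOURCE A (Python) =====
-- from typing import Any
--
-- def _short_title(text: str, limit: int = 24) -> str:
--     cleaned = " ".join(text.strip().split())
--     if len(cleaned) <= limit:
--         return cleaned or "新对话"
--     return f"{cleaned[: limit - 1]}…"
--
-- def _summary_snippet(text: str, limit: int = 48) -> str:
--     return _short_title(text, limit)
--
-- def _seed_summary(title: str, messages: list[dict[str, Any]]) -> str:
--     user_snippet = ""
--     assistant_snippet = ""
--     for message in messages:
--         role = str(message.get("role") or "").strip()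
--         content = str(message.get("content") or "").strip()
--         if role == "user" and not user_snippet:
--             user_snippet = _summary_snippet(content)
--         elif role == "assistant":
--             assistant_snippet = _summary_snippet(content)
--
--     parts: list[str] = []
--     if user_snippet:
--         parts.append(f"用户：{user_snippet}")
--     if assistant_snippet:
--         parts.append(f"助手：{assistant_snippet}")
--     if not parts:
--         parts.append(_summary_snippet(title or "新对话", 28))
--     return " | ".join(parts)
-- ===== SOURCE B (Python) =====
-- def _short_title(text: str, limit: int = 24) -> str:
--     cleaned = " ".join(text.strip().split())
--     if len(cleaned) <= limit:
--         return cleaned or "新对话"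
--     return f"{cleaned[: limit - 1]}…"
--
-- def _summary_snippet(text: str, limit: int = 48) -> str:
--     return _short_title(text, limit)
--
-- def _seed_summary(title: str, messages) -> str:
--     def norm(m, key):
--         return str(m.get(key) or "").strip()
--     user_msg = next((m for m in messages if norm(m, "role") == "user"), None)
--     assistant_msg = next((m for m in reversed(messages) if norm(m, "role") == "assistant"), None)
--     parts = []
--     if user_msg is not None:
--         parts.append(f"用户：{_summary_snippet(norm(user_msg, 'content'))}")
--     if assistant_msg is not None:
--         parts.append(f"助手：{_summary_snippet(norm(assistant_msg, 'content'))}")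
--     if not parts:
--         parts.append(_summary_snippet(title or "新对话", 28))
--     return " | ".join(parts)
-- ===== Notes on version B (the rewrite author's own statement) =====
-- stated objective: idiomatic
-- what changed: Replaces A's single flag-driven stateful loop with two independent searches: a forward first-match scan for the user message and a reverse scan for the last assistant message, deriving the snippets from the found messages.
import Mathlib
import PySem

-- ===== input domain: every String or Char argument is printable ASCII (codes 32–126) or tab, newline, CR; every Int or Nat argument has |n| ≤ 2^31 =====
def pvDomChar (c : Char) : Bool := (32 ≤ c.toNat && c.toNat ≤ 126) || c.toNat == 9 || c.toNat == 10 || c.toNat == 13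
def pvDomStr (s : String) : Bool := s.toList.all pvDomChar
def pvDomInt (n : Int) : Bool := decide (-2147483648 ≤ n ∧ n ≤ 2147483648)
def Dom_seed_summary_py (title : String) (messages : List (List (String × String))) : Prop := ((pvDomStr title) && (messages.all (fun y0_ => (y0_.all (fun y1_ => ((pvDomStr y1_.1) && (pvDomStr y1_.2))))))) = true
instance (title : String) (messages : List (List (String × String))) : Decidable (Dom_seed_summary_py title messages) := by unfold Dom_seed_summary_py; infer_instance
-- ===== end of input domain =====

-- B replaces A's flag-driven single loop by a forward search for the first user
-- message and a reverse search for the last assistant message (idiomatic; same cost).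

-- ===== PORT A =====
-- shared helper: _short_title(text, limit)
def shortTitle (text : String) (limit : Int) : String :=
  let cleaned := PySem.Str.join " " (PySem.Str.split₀ (PySem.Str.strip text))
  if (PySem.Str.len cleaned : Int) ≤ limit then
    (if cleaned == "" then "新对话" else cleaned)
  else
    String.ofList (PySem.List.slice cleaned.toList none (some (limit - 1)) ++ ['…'])

-- shared helper: _summary_snippet(text, limit)
def summarySnippet (text : String) (limit : Int) : String := shortTitle text limit

-- role/content extraction: str(message.get(k) or "").strip()  (string values: str() is identity)
def normField (m : List (String × String)) (k : String) : String :=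
  PySem.Str.strip (PySem.Dict.getD (PySem.Dict.mk m) k "")

def seed_summary_py (title : String) (messages : List (List (String × String))) : String :=
  let st := messages.foldl (fun (s : String × String) m =>
      let role := normField m "role"
      let content := normField m "content"
      if role == "user" && s.1 == "" then (summarySnippet content 48, s.2)
      else if role == "assistant" then (s.1, summarySnippet content 48)
      else s) ("", "")
  let parts : List String := if st.1 == "" then [] else [String.ofList ("用户：".toList ++ st.1.toList)]
  let parts := if st.2 == "" then parts else parts ++ [String.ofList ("助手：".toList ++ st.2.toList)]
  let parts := if parts.isEmpty then [summarySnippet (if title == "" then "新对话" else title) 28] else parts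
  PySem.Str.join " | " parts

-- ===== PORT B =====
def seed_summary_py_alt (title : String) (messages : List (List (String × String))) : String :=
  let userMsg := messages.find? (fun m => normField m "role" == "user")
  let asstMsg := messages.reverse.find? (fun m => normField m "role" == "assistant")
  let parts : List String :=
    (match userMsg with
     | some m => [String.ofList ("用户：".toList ++ (summarySnippet (normField m "content") 48).toList)]
     | none => [])
  let parts := parts ++
    (match asstMsg with
     | some m => [String.ofList ("助手：".toList ++ (summarySnippet (normField m "content") 48).toList)]
     | none => [])
  let parts := if parts.isEmpty then [summarySnippet (if title == "" then "新对话" else title) 28] else parts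
  PySem.Str.join " | " parts

-- ===== PRECONDITION & SPEC =====
def Spec_seed_summary_py (title : String) (messages : List (List (String × String))) (out : String) : Prop := out = seed_summary_py_alt title messages
instance (title : String) (messages : List (List (String × String))) (out : String) : Decidable (Spec_seed_summary_py title messages out) := by unfold Spec_seed_summary_py; infer_instance

-- ===== CLAIM (what is proved, stated in full; the proofs are below) =====
def Claim_equal_seed_summary_py : Prop := ∀ (title : String) (messages : List (List (String × String))), Dom_seed_summary_py title messages → Spec_seed_summary_py title messages (seed_summary_py title messages)

-- ===== LEMMAS AND PROOFS =====

-- A's loop body, named for the lemmas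
def stepA (s : String × String) (m : List (String × String)) : String × String :=
  if normField m "role" == "user" && s.1 == "" then (summarySnippet (normField m "content") 48, s.2)
  else if normField m "role" == "assistant" then (s.1, summarySnippet (normField m "content") 48)
  else s

theorem summarySnippet_ne_empty (t : String) : ¬ (summarySnippet t 48 == "") = true := by
  unfold summarySnippet shortTitle
  intro h
  simp only [beq_iff_eq] at h
  set cleaned := PySem.Str.join " " (PySem.Str.split₀ (PySem.Str.strip t)) with hc
  split_ifs at h with h1 h2
  · simp at h
  · exact h2 (by simp [h])
  · have := congrArg String.toList h
    simp at this

theorem stepA_fst_of_ne (s : String × String) (m : List (String × String))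
    (hu : ¬ (s.1 == "") = true) : (stepA s m).1 = s.1 := by
  unfold stepA
  split_ifs with h1 h2 <;> simp_all

theorem foldlA_fst_of_ne (ms : List (List (String × String))) (u a : String)
    (hu : ¬ (u == "") = true) : (ms.foldl stepA (u, a)).1 = u := by
  induction ms generalizing u a with
  | nil => rfl
  | cons m t ih =>
    simp only [List.foldl_cons]
    have h := stepA_fst_of_ne (u, a) m hu
    calc (t.foldl stepA (stepA (u, a) m)).1
        = (t.foldl stepA ((stepA (u, a) m).1, (stepA (u, a) m).2)).1 := rfl
      _ = (stepA (u, a) m).1 := ih _ _ (by rw [h]; exact hu)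
      _ = u := h

theorem foldlA_fst (ms : List (List (String × String))) (a : String) :
    (ms.foldl stepA ("", a)).1 =
      match ms.find? (fun m => normField m "role" == "user") with
      | some m => summarySnippet (normField m "content") 48
      | none => "" := by
  induction ms generalizing a with
  | nil => rfl
  | cons m t ih =>
    simp only [List.foldl_cons]
    by_cases hm : (normField m "role" == "user") = true
    · rw [List.find?_cons_of_pos (by exact hm)]
      have h1 : stepA ("", a) m = (summarySnippet (normField m "content") 48, a) := by
        unfold stepA
        rw [hm]
        simp only [beq_self_eq_true, Bool.and_true, if_true]
      rw [h1, foldlA_fst_of_ne t (summarySnippet (normField m "content") 48) a (summarySnippet_ne_empty (normField m "content"))]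
    · have hmf : (normField m "role" == "user") = false := by simpa using hm
      rw [List.find?_cons_of_neg (by simp [hmf])]
      have h1 : (stepA ("", a) m).1 = "" := by
        unfold stepA
        rw [hmf]
        simp only [Bool.false_and, Bool.false_eq_true, if_false]
        by_cases h2 : (normField m "role" == "assistant") = true
        · rw [if_pos h2]
        · rw [if_neg h2]
      have h2 : stepA ("", a) m = ("", (stepA ("", a) m).2) := by
        rw [Prod.ext_iff]
        exact ⟨h1, rfl⟩
      rw [h2, ih]

theorem stepA_snd (s : String × String) (m : List (String × String)) :
    (stepA s m).2 = if (normField m "role" == "assistant") = true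
        then summarySnippet (normField m "content") 48 else s.2 := by
  unfold stepA
  by_cases h1 : (normField m "role" == "user" && s.1 == "") = true
  · have hr : normField m "role" = "user" := by
      have h1' := h1
      simp only [Bool.and_eq_true] at h1'
      exact beq_iff_eq.mp h1'.1
    simp [hr]
    split_ifs <;> rfl
  · simp only [h1]
    by_cases h2 : (normField m "role" == "assistant") = true <;> simp [h2]

theorem foldlA_snd (ms : List (List (String × String))) (s : String × String) :
    (ms.foldl stepA s).2 =
      match ms.reverse.find? (fun m => normField m "role" == "assistant") with
      | some m => summarySnippet (normField m "content") 48
      | none => s.2 := by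
  induction ms generalizing s with
  | nil => rfl
  | cons m t ih =>
    simp only [List.foldl_cons, List.reverse_cons]
    rw [ih]
    rcases hf : t.reverse.find? (fun m => normField m "role" == "assistant") with _ | x
    · have : (t.reverse ++ [m]).find? (fun m => normField m "role" == "assistant") =
          [m].find? (fun m => normField m "role" == "assistant") := by
        rw [List.find?_append, hf]; rfl
      rw [this]
      simp only [List.find?_cons, List.find?_nil]
      rw [stepA_snd]
      by_cases hm : (normField m "role" == "assistant") = true <;> simp [hm]
    · have : (t.reverse ++ [m]).find? (fun m => normField m "role" == "assistant") = some x := by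
        rw [List.find?_append, hf]; rfl
      rw [this]

-- ===== VERDICT (by name: the statement is the Claim_ definition above) =====
theorem seed_summary_py_spec : Claim_equal_seed_summary_py := by
  intro title messages _
  unfold Spec_seed_summary_py seed_summary_py seed_summary_py_alt
  show PySem.Str.join " | " _ = PySem.Str.join " | " _
  have hfold : messages.foldl (fun (s : String × String) m =>
      let role := normField m "role"
      let content := normField m "content"
      if role == "user" && s.1 == "" then (summarySnippet content 48, s.2)
      else if role == "assistant" then (s.1, summarySnippet content 48)
      else s) ("", "") = messages.foldl stepA ("", "") := rfl
  rw [hfold]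
  rw [foldlA_fst messages "", foldlA_snd messages ("", "")]
  rcases hu : messages.find? (fun m => normField m "role" == "user") with _ | mu <;>
    rcases ha : messages.reverse.find? (fun m => normField m "role" == "assistant") with _ | ma <;>
    simp [summarySnippet_ne_empty]
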